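-- pv_equiv track=rewrite | github.com/mohitmv/char_image | image_to_char_image_tool.py | GetCppCode
-- ===== SOURCE A (Python) =====
-- def GetCppCode(pattern_string, on_char, off_char):
--   cpp = {}
--   cpp["string"] = on_char + off_char;
--   buffer_sign = False;
--   buffer_len = 0;
--   def push(buffer_sign, buffer_len):
--     if buffer_len == 0:
--       return;
--     assert(buffer_len < 128);
--     cpp["string"] += hex((256 + (1 if buffer_sign else -1)*buffer_len)%256)[2:].zfill(2);
--   for ii, i in enumerate(pattern_string):
--     if i == '\n':
--       push(buffer_sign, buffer_len);
--       cpp["string"] += "-";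
--       buffer_len = 0;
--     elif buffer_len == 0:
--       buffer_sign = (i == on_char);
--       buffer_len += 1;
--     elif (i == on_char) == buffer_sign:
--       buffer_len += 1;
--     else:
--       push(buffer_sign, buffer_len);
--       buffer_sign = 1-buffer_sign;
--       buffer_len = 1;
--   if buffer_len > 0:
--     push(buffer_sign, buffer_len);
--   cpp["code"] = """
-- #include <iostream>
-- #include <sstream>
--
-- int main() {
--   std::cout << ([]() {
--     std::ostringstream oss;
--     std::string pattern = \"""" + cpp["string"] + """\";
--     auto lHex = [](char a) { return int(('0' <= a && a <= '9') ? a-'0' : 10+(a-'a')); };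
--     for (int i = 2; i < pattern.size(); i++) {
--       if(pattern[i] == '-') {
--         oss << "\\n";
--       } else {
--         int tmp = lHex(pattern[i])*16 + lHex(pattern[i+1]);
--         char print_char = tmp < 128 ? pattern[0]: pattern[1];
--         int len = tmp < 128 ? tmp: (256-tmp);
--         while(len-- > 0) {
--           oss << print_char;
--         }
--         i++;
--       }
--     }
--     return oss.str();
--   }()) << std::endl;
--   return 0;
-- }
--   """
--   return cpp["code"];
-- ===== SOURCE B (Python) =====
-- # B: decomposition rewrite — split the pattern into lines, RLE-encode each line
-- # with itertools.groupby, and '-'.join the encoded lines, instead of A's single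
-- # character-by-character state machine with a mutable buffer.
-- import itertools
--
-- def GetCppCode(pattern_string, on_char, off_char):
--   encoded_lines = []
--   for line in pattern_string.split('\n'):
--     enc = ""
--     for is_on, group in itertools.groupby(line, key=lambda c: c == on_char):
--       length = len(list(group))
--       assert(length < 128)
--       enc += hex((256 + (1 if is_on else -1)*length) % 256)[2:].zfill(2)
--     encoded_lines.append(enc)
--   pattern = on_char + off_char + "-".join(encoded_lines)
--   return """
-- #include <iostream>
-- #include <sstream>
--
-- int main() {
--   std::cout << ([]() {
--     std::ostringstream oss;
--     std::string pattern = \"""" + pattern + """\";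
--     auto lHex = [](char a) { return int(('0' <= a && a <= '9') ? a-'0' : 10+(a-'a')); };
--     for (int i = 2; i < pattern.size(); i++) {
--       if(pattern[i] == '-') {
--         oss << "\\n";
--       } else {
--         int tmp = lHex(pattern[i])*16 + lHex(pattern[i+1]);
--         char print_char = tmp < 128 ? pattern[0]: pattern[1];
--         int len = tmp < 128 ? tmp: (256-tmp);
--         while(len-- > 0) {
--           oss << print_char;
--         }
--         i++;
--       }
--     }
--     return oss.str();
--   }()) << std::endl;
--   return 0;
-- }
--   """
-- ===== Notes on version B (the rewrite author's own statement) =====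
-- stated objective: alternative
-- what changed: Replaces A's single character-by-character state machine (mutable buffer_sign/buffer_len with an inner push closure) by a split-lines / groupby-runs / '-'.join decomposition: each line is split into maximal runs with itertools.groupby and encoded independently.
import Mathlib
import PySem

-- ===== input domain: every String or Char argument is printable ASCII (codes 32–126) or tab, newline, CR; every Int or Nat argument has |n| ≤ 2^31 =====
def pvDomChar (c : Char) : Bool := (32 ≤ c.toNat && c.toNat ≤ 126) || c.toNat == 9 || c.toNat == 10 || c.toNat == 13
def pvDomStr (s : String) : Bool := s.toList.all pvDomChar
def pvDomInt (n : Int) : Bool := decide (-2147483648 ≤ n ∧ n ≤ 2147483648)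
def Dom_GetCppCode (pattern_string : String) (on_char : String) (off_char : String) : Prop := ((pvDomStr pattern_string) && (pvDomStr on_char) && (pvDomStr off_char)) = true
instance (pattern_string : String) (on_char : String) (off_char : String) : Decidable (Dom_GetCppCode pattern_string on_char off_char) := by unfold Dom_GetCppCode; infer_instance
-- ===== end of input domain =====

-- B restructures A's single character-by-character state machine into split-lines /
-- group-runs / join (objective: alternative decomposition, same cost); return values
-- proved equal wherever Python A returns (Pre_ excludes only A's AssertionError inputs).

-- ===== shared helpers (the C++ wrapper text and the 2-hex-digit run encoding, used verbatim by both programs) =====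
def pvTmpl1 : List Char := String.toList "\n#include <iostream>\n#include <sstream>\n\nint main() {\n  std::cout << ([]() {\n    std::ostringstream oss;\n    std::string pattern = \""

def pvTmpl2 : List Char := String.toList "\";\n    auto lHex = [](char a) { return int(('0' <= a && a <= '9') ? a-'0' : 10+(a-'a')); };\n    for (int i = 2; i < pattern.size(); i++) {\n      if(pattern[i] == '-') {\n        oss << \"\\n\";\n      } else {\n        int tmp = lHex(pattern[i])*16 + lHex(pattern[i+1]);\n        char print_char = tmp < 128 ? pattern[0]: pattern[1];\n        int len = tmp < 128 ? tmp: (256-tmp);\n        while(len-- > 0) {\n          oss << print_char;\n        }\n        i++;\n      }\n    }\n    return oss.str();\n  }()) << std::endl;\n  return 0;\n}\n  "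

-- one lowercase hex digit, as Python's hex() produces
def pvHexDig (d : Nat) : Char := if d < 10 then Char.ofNat (48 + d) else Char.ofNat (87 + d)

-- hex(n)[2:].zfill(2) for 0 ≤ n < 256 (both programs only apply it to m % 256)
def pvHex2 (n : Int) : List Char := [pvHexDig (n.toNat / 16), pvHexDig (n.toNat % 16)]

-- Python's  i == on_char  where i is a 1-character string
def pvKey (on_char : String) (c : Char) : Bool := String.mk [c] == on_char

-- ===== PORT A =====
-- push(buffer_sign, buffer_len): early return on len 0, else append the hex byte.
-- Its 'assert buffer_len < 128' raises exactly on the inputs Pre_GetCppCode excludes.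
def pvPush (sign : Bool) (len : Nat) : List Char :=
  if len = 0 then []
  else pvHex2 (PySem.Int.mod (256 + (if sign then (len : Int) else -(len : Int))) 256)

-- the for-loop over enumerate(pattern_string); state = (cpp["string"] so far, buffer_sign, buffer_len).
-- Python's 'buffer_sign = 1-buffer_sign' flips the sign's truthiness: ported as !sign.
def pvLoopA (on_char : String) : List Char → List Char → Bool → Nat → List Char
  | acc, [], sign, len => if 0 < len then acc ++ pvPush sign len else acc
  | acc, c :: cs, sign, len =>
    if c = '\n' then pvLoopA on_char (acc ++ pvPush sign len ++ ['-']) cs sign 0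
    else if len = 0 then pvLoopA on_char acc cs (pvKey on_char c) 1
    else if pvKey on_char c = sign then pvLoopA on_char acc cs sign (len + 1)
    else pvLoopA on_char (acc ++ pvPush sign len) cs (!sign) 1

def GetCppCode (pattern_string : String) (on_char : String) (off_char : String) : String :=
  String.mk (pvTmpl1 ++ pvLoopA on_char (on_char.toList ++ off_char.toList) pattern_string.toList false 0 ++ pvTmpl2)

-- ===== PORT B =====
-- itertools.groupby(line, key) reduced to (key, run length) pairs
def pvGroupRuns (key : Char → Bool) : List Char → List (Bool × Nat)
  | [] => []
  | c :: cs =>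
    match pvGroupRuns key cs with
    | [] => [(key c, 1)]
    | (k, m) :: rest => if key c = k then (k, m + 1) :: rest else (key c, 1) :: (k, m) :: rest

-- hex((256 + (1 if is_on else -1)*length) % 256)[2:].zfill(2)
def pvEncodeRun (r : Bool × Nat) : List Char :=
  pvHex2 (PySem.Int.mod (256 + (if r.1 then (r.2 : Int) else -(r.2 : Int))) 256)

-- the per-line encoding loop (''-concatenation of the encoded runs)
def pvEncodeLine (key : Char → Bool) (l : List Char) : List Char :=
  ((pvGroupRuns key l).map pvEncodeRun).flatten

def GetCppCode_alt (pattern_string : String) (on_char : String) (off_char : String) : String :=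
  String.mk (pvTmpl1 ++
    (on_char.toList ++ off_char.toList ++
      PySem.Chars.join ['-']
        ((PySem.Chars.splitOn pattern_string.toList ['\n']).map (pvEncodeLine (pvKey on_char)))) ++
    pvTmpl2)

-- ===== PRECONDITION & SPEC =====
-- Pre_ excludes exactly the inputs on which Python A raises AssertionError: a maximal
-- within-line run of ≥ 128 equal-keyed characters, i.e. some 128-character window that
-- contains no newline and is constant under (c == on_char).
def Pre_GetCppCode (pattern_string : String) (on_char : String) (off_char : String) : Prop :=
  ∀ i ∈ List.range pattern_string.toList.length,
    ¬ (128 ≤ ((pattern_string.toList.drop i).take 128).length ∧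
       (∀ c ∈ (pattern_string.toList.drop i).take 128, c ≠ '\n') ∧
       ((∀ c ∈ (pattern_string.toList.drop i).take 128, String.mk [c] = on_char) ∨
        (∀ c ∈ (pattern_string.toList.drop i).take 128, String.mk [c] ≠ on_char)))
instance (pattern_string : String) (on_char : String) (off_char : String) : Decidable (Pre_GetCppCode pattern_string on_char off_char) := by unfold Pre_GetCppCode; infer_instance

def pvWitness_GetCppCode : String × String × String := ("ab\n ba", "a", "b")

def Spec_GetCppCode (pattern_string : String) (on_char : String) (off_char : String) (out : String) : Prop := out = GetCppCode_alt pattern_string on_char off_char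
instance (pattern_string : String) (on_char : String) (off_char : String) (out : String) : Decidable (Spec_GetCppCode pattern_string on_char off_char out) := by unfold Spec_GetCppCode; infer_instance

-- ===== CLAIM (what is proved, stated in full; the proofs are below) =====
def Claim_equal_GetCppCode : Prop := ∀ (pattern_string : String) (on_char : String) (off_char : String), Dom_GetCppCode pattern_string on_char off_char → Pre_GetCppCode pattern_string on_char off_char → Spec_GetCppCode pattern_string on_char off_char (GetCppCode pattern_string on_char off_char)

-- ===== LEMMAS AND PROOFS =====

-- reference line splitter: Python's s.split('\n')
def pvSplit : List Char → List (List Char)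
  | [] => [[]]
  | c :: cs =>
    if c = '\n' then [] :: pvSplit cs
    else match pvSplit cs with
      | [] => [[c]]
      | m :: ms => (c :: m) :: ms

lemma pvSplit_ne_nil (cs : List Char) : pvSplit cs ≠ [] := by
  cases cs with
  | nil => simp [pvSplit]
  | cons c cs =>
    simp only [pvSplit]
    split
    · simp
    · split <;> simp_all

lemma pvSplitOn_go_spec (fuel : Nat) : ∀ (l cur : List Char) (acc : List (List Char)), l.length < fuel →
    PySem.Chars.splitOn.go ['\n'] fuel l cur acc =
      acc.reverse ++ (match pvSplit l with
        | [] => []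
        | m :: ms => (cur.reverse ++ m) :: ms) := by
  induction fuel with
  | zero => intro l cur acc h; omega
  | succ f ih =>
    intro l cur acc h
    cases l with
    | nil => simp [PySem.Chars.splitOn.go, pvSplit]
    | cons c rest =>
      by_cases hc : c = '\n'
      · rcases hsp : pvSplit rest with _ | ⟨m, ms⟩
        · exact absurd hsp (pvSplit_ne_nil _)
        · simp only [PySem.Chars.splitOn.go, hc, List.isPrefixOf, BEq.rfl, Bool.true_and, if_pos, List.length_cons, List.length_nil,
            List.drop_succ_cons, List.drop_zero]
          rw [ih rest [] (cur.reverse :: acc) (by simp at h; omega)]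
          simp [pvSplit, hsp]
      · rcases hsp : pvSplit rest with _ | ⟨m, ms⟩
        · exact absurd hsp (pvSplit_ne_nil _)
        · have hpre : ['\n'].isPrefixOf (c :: rest) = false := by
            simp [List.isPrefixOf, hc, Ne.symm hc]
          simp only [PySem.Chars.splitOn.go, hpre, Bool.false_eq_true, if_false]
          rw [ih rest (c :: cur) acc (by simp at h; omega)]
          simp [pvSplit, hc, hsp]

lemma pvSplitOn_eq (cs : List Char) : PySem.Chars.splitOn cs ['\n'] = pvSplit cs := by
  rw [PySem.Chars.splitOn, pvSplitOn_go_spec (cs.length + 1) cs [] [] (by omega)]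
  rcases hsp : pvSplit cs with _ | ⟨m, ms⟩
  · exact absurd hsp (pvSplit_ne_nil _)
  · simp

-- A's state machine with the accumulated output dropped
def pvEncCont (key : Char → Bool) : Bool → Nat → List Char → List Char
  | sign, len, [] => pvPush sign len
  | sign, len, c :: cs =>
    if c = '\n' then pvPush sign len ++ '-' :: pvEncCont key sign 0 cs
    else if len = 0 then pvEncCont key (key c) 1 cs
    else if key c = sign then pvEncCont key sign (len + 1) cs
    else pvPush sign len ++ pvEncCont key (key c) 1 cs

lemma pvLoopA_eq (on_char : String) (cs : List Char) : ∀ (acc : List Char) (sign : Bool) (len : Nat),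
    pvLoopA on_char acc cs sign len = acc ++ pvEncCont (pvKey on_char) sign len cs := by
  induction cs with
  | nil =>
    intro acc sign len
    by_cases h : len = 0 <;> simp [pvLoopA, pvEncCont, pvPush, h]
  | cons c cs ih =>
    intro acc sign len
    by_cases hnl : c = '\n'
    · simp [pvLoopA, pvEncCont, hnl, ih]
    · by_cases h0 : len = 0
      · simp [pvLoopA, pvEncCont, hnl, h0, ih]
      · by_cases hk : pvKey on_char c = sign
        · simp [pvLoopA, pvEncCont, hnl, h0, hk, ih]
        · have hks : pvKey on_char c = !sign := by
            cases hsgn : sign <;> cases hkc : pvKey on_char c <;> simp_all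
          simp [pvLoopA, pvEncCont, hnl, h0, ih, hks]

-- left-scan run grouping with a pending run (sign, len)
def pvRunsW (key : Char → Bool) : Bool → Nat → List Char → List (Bool × Nat)
  | sign, len, [] => if len = 0 then [] else [(sign, len)]
  | sign, len, c :: cs =>
    if len = 0 then pvRunsW key (key c) 1 cs
    else if key c = sign then pvRunsW key sign (len + 1) cs
    else (sign, len) :: pvRunsW key (key c) 1 cs

def pvFlat (key : Char → Bool) (sign : Bool) (len : Nat) (l : List Char) : List Char :=
  ((pvRunsW key sign len l).map pvEncodeRun).flatten

def pvEncTail (key : Char → Bool) : List (List Char) → List Char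
  | [] => []
  | l :: ls => '-' :: (pvFlat key false 0 l ++ pvEncTail key ls)

def pvEncLines (key : Char → Bool) (sign : Bool) (len : Nat) : List (List Char) → List Char
  | [] => []
  | l :: ls => pvFlat key sign len l ++ pvEncTail key ls

lemma pvRunsW_zero (key : Char → Bool) (l : List Char) (a b : Bool) :
    pvRunsW key a 0 l = pvRunsW key b 0 l := by
  cases l <;> simp [pvRunsW]

lemma pvMain (key : Char → Bool) (cs : List Char) : ∀ (sign : Bool) (len : Nat),
    pvEncCont key sign len cs = pvEncLines key sign len (pvSplit cs) := by
  induction cs with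
  | nil =>
    intro sign len
    simp [pvEncCont, pvSplit, pvEncLines, pvEncTail, pvFlat, pvRunsW]
    by_cases h : len = 0 <;> simp [h, pvPush, pvEncodeRun]
  | cons c cs ih =>
    intro sign len
    by_cases hnl : c = '\n'
    · rcases hsp : pvSplit cs with _ | ⟨m, ms⟩
      · exact absurd hsp (pvSplit_ne_nil _)
      · simp only [pvEncCont, hnl, pvSplit, ih, hsp, pvEncLines, pvFlat]
        rw [pvRunsW_zero key m sign false]
        by_cases h : len = 0 <;> simp [pvRunsW, pvEncTail, pvPush, pvEncodeRun, pvFlat, h]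
    · rcases hsp : pvSplit cs with _ | ⟨m, ms⟩
      · exact absurd hsp (pvSplit_ne_nil _)
      · by_cases h0 : len = 0
        · simp only [pvEncCont, hnl, h0, ih, hsp, pvSplit, pvEncLines, pvFlat]
          simp [pvRunsW]
        · by_cases hk : key c = sign
          · simp only [pvEncCont, hnl, h0, hk, ih, hsp, pvSplit, pvEncLines, pvFlat]
            simp [pvRunsW, h0, hk]
          · simp only [pvEncCont, hnl, h0, hk, ih, hsp, pvSplit, pvEncLines, pvFlat]
            simp [pvRunsW, h0, hk, pvPush, pvEncodeRun]

-- merge a pending run into an already-grouped list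
def pvConsRun (s : Bool) (n : Nat) : List (Bool × Nat) → List (Bool × Nat)
  | [] => [(s, n)]
  | (k, m) :: rest => if s = k then (s, n + m) :: rest else (s, n) :: (k, m) :: rest

lemma pvRunsW_pos (key : Char → Bool) (l : List Char) : ∀ (s : Bool) (n : Nat), 0 < n →
    pvRunsW key s n l = pvConsRun s n (pvGroupRuns key l) := by
  induction l with
  | nil =>
    intro s n hn
    simp [pvRunsW, pvGroupRuns, pvConsRun, Nat.pos_iff_ne_zero.mp hn]
  | cons c cs ih =>
    intro s n hn
    simp only [pvRunsW, Nat.pos_iff_ne_zero.mp hn, if_false, pvGroupRuns]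
    by_cases hk : key c = s
    · rw [if_pos hk, ih _ _ (by omega)]
      rcases hg : pvGroupRuns key cs with _ | ⟨⟨k, m⟩, rest⟩
      · simp [pvConsRun, hk]
      · by_cases hck : key c = k
        · simp [pvConsRun, hk, hck, hk ▸ hck]
          omega
        · simp [pvConsRun, hk, hck, hk ▸ hck]
    · rw [if_neg hk, ih _ _ (by omega)]
      rcases hg : pvGroupRuns key cs with _ | ⟨⟨k, m⟩, rest⟩
      · simp [pvConsRun, hk, Ne.symm hk]
      · by_cases hck : key c = k
        · have hsk : ¬ s = k := fun h => hk (h ▸ hck)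
          simp [pvConsRun, hck, hsk, Nat.add_comm]
        · simp [pvConsRun, hck, Ne.symm hk]

lemma pvRunsW_eq_groupRuns (key : Char → Bool) (l : List Char) :
    pvRunsW key false 0 l = pvGroupRuns key l := by
  cases l with
  | nil => simp [pvRunsW, pvGroupRuns]
  | cons c cs =>
    simp only [pvRunsW, if_pos rfl, pvGroupRuns]
    rw [pvRunsW_pos key cs _ 1 Nat.one_pos]
    rcases hg : pvGroupRuns key cs with _ | ⟨⟨k, m⟩, rest⟩
    · simp [pvConsRun]
    · by_cases hck : key c = k <;> simp [pvConsRun, hck] <;> omega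

lemma pvJoin_eq_encLines (key : Char → Bool) : ∀ (ls : List (List Char)) (l : List Char),
    PySem.Chars.join ['-'] ((l :: ls).map (pvEncodeLine key)) = pvEncLines key false 0 (l :: ls) := by
  intro ls
  induction ls with
  | nil =>
    intro l
    simp [PySem.Chars.join_singleton, pvEncLines, pvEncTail, pvFlat, pvEncodeLine,
      pvRunsW_eq_groupRuns]
  | cons l2 ls ih =>
    intro l
    rw [List.map_cons, List.map_cons, PySem.Chars.join_cons_cons, ← List.map_cons, ih l2]
    simp [pvEncLines, pvEncTail, pvFlat, pvEncodeLine, pvRunsW_eq_groupRuns]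

-- ===== VERDICT (by name: the statement is the Claim_ definition above) =====
theorem GetCppCode_spec : Claim_equal_GetCppCode := by
  intro p on off _ _
  unfold Spec_GetCppCode GetCppCode GetCppCode_alt
  have h1 := pvLoopA_eq on p.toList (on.toList ++ off.toList) false 0
  have h2 := pvMain (pvKey on) p.toList false 0
  rcases hsp : pvSplit p.toList with _ | ⟨l, ls⟩
  · exact absurd hsp (pvSplit_ne_nil _)
  · have h3 := pvJoin_eq_encLines (pvKey on) ls l
    rw [h1, h2, hsp, pvSplitOn_eq, hsp, h3]
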